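-- pv_equiv track=rewrite | github.com/LeJawa/AdventOfCodeSolutions | src/2015/11/part1.py | get_next_password
-- ===== SOURCE A (Python) =====
-- def get_next_password(old_password: str) -> str:
--     new_password = ""
--     incrementing = True
--     for c in old_password[::-1]:
--         next_ord = ord(c)
--         if incrementing:
--             next_ord += 1
--             if next_ord == 123:
--                 next_ord = 97
--                 incrementing = True
--             else:
--                 incrementing = False
--
--         new_password += chr(next_ord)
--
--     return new_password[::-1]
-- ===== SOURCE B (Python) =====
-- def get_next_password(old_password: str) -> str:
--     n = len(old_password)
--     i = n - 1
--     while i >= 0 and old_password[i] == 'z':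
--         i -= 1
--     if i < 0:
--         return 'a' * n
--     return old_password[:i] + chr(ord(old_password[i]) + 1) + 'a' * (n - i - 1)
-- ===== Notes on version B (the rewrite author's own statement) =====
-- stated objective: simpler
-- what changed: Replaces the reverse pass with a carry flag and character-by-character string building by a rightmost-non-z scan followed by slice-based construction (prefix + bumped char + padding).
import Mathlib
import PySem

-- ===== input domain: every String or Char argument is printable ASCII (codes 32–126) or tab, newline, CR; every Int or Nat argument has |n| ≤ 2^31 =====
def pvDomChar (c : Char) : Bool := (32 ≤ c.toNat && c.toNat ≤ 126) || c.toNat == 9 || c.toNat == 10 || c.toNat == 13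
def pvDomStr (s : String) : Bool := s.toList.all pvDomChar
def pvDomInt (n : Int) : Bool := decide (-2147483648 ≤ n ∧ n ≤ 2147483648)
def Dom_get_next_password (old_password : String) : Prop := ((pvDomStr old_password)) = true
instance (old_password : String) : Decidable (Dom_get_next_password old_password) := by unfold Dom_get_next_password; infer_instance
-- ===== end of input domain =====

-- B replaces A's reverse pass with a carry flag by a rightmost-non-'z' scan plus slice construction (simpler decomposition).

-- ===== PORT A =====
-- A's for-loop over old_password[::-1] with state (new_password, incrementing), transliterated as structural recursion.
def getNextGo : List Char → List Char → Bool → List Char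
  | [], acc, _ => acc
  | c :: rest, acc, inc =>
    let o := c.toNat
    if inc then
      let o2 := o + 1
      if o2 = 123 then getNextGo rest (acc ++ [Char.ofNat 97]) true
      else getNextGo rest (acc ++ [Char.ofNat o2]) false
    else getNextGo rest (acc ++ [Char.ofNat o]) false

def get_next_password (old_password : String) : String :=
  String.ofList (getNextGo old_password.toList.reverse [] true).reverse

-- ===== PORT B =====
-- B's while-loop from the right: replace trailing 'z's by 'a's, bump the first non-'z', keep the prefix.
def altGo : List Char → List Char
  | [] => []
  | c :: rest => if c = 'z' then 'a' :: altGo rest else Char.ofNat (c.toNat + 1) :: rest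

def get_next_password_alt (old_password : String) : String :=
  String.ofList (altGo old_password.toList.reverse).reverse

-- ===== PRECONDITION & SPEC =====
def Spec_get_next_password (old_password : String) (out : String) : Prop := out = get_next_password_alt old_password
instance (old_password : String) (out : String) : Decidable (Spec_get_next_password old_password out) := by unfold Spec_get_next_password; infer_instance

-- ===== CLAIM (what is proved, stated in full; the proofs are below) =====
def Claim_equal_get_next_password : Prop := ∀ (old_password : String), Dom_get_next_password old_password → Spec_get_next_password old_password (get_next_password old_password)

-- ===== LEMMAS AND PROOFS =====

theorem getNextGo_false (l acc : List Char) : getNextGo l acc false = acc ++ l := by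
  induction l generalizing acc with
  | nil => simp [getNextGo]
  | cons c rest ih => simp [getNextGo, ih, Char.ofNat_toNat]

theorem getNextGo_eq_altGo (l acc : List Char) : getNextGo l acc true = acc ++ altGo l := by
  induction l generalizing acc with
  | nil => simp [getNextGo, altGo]
  | cons c rest ih =>
    by_cases hz : c = 'z'
    · subst hz
      simp [getNextGo, altGo, ih]
    · have h123 : ¬ (c.toNat + 1 = 123) := by
        intro h
        have h122 : c.toNat = 122 := by omega
        have hcz := Char.ofNat_toNat c
        rw [h122] at hcz
        exact hz hcz.symm
      simp [getNextGo, altGo, hz, h123, getNextGo_false]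

-- ===== VERDICT (by name: the statement is the Claim_ definition above) =====
theorem get_next_password_spec : Claim_equal_get_next_password := by
  intro s _
  unfold Spec_get_next_password get_next_password get_next_password_alt
  rw [getNextGo_eq_altGo]
  simp
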